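-- pv_equiv track=rewrite | github.com/vasistacv/samarth-ai | agent/core.py | _structured_is_valid
-- ===== SOURCE A (Python) =====
-- from typing import Dict, Any, Optional, List, Tuple
--
-- def _structured_is_valid(headers: List[str], rows: List[Tuple]) -> bool:
--     if not headers or not rows:
--         return False
--     # If rainfall present, ensure at least one non-null numeric
--     if "annual_rainfall_mm" in headers:
--         idx = headers.index("annual_rainfall_mm")
--         has_val = any(
--             (r[idx] is not None) and (str(r[idx]).strip().lower() not in {"", "null", "none"})
--             for r in rows
--         )
--         if not has_val:
--             return False
--     # If production present, ensure some non-null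
--     for key in ("production", "total_production"):
--         if key in headers:
--             idx = headers.index(key)
--             if not any((r[idx] is not None) and (str(r[idx]).strip().lower() not in {"", "null", "none"}) for r in rows):
--                 return False
--     return True
-- ===== SOURCE B (Python) =====
-- def _structured_is_valid(headers, rows):
--     if not headers or not rows:
--         return False
--     # single stateful pass: indices of required columns still lacking a non-null value
--     needed = [headers.index(k)
--               for k in ("annual_rainfall_mm", "production", "total_production")
--               if k in headers]
--     for r in rows:
--         if not needed:
--             break
--         needed = [i for i in needed
--                   if r[i] is None or str(r[i]).strip().lower() in {"", "null", "none"}]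
--     return not needed
-- ===== Notes on version B (the rewrite author's own statement) =====
-- stated objective: alternative
-- what changed: A scans all rows once per required column (rainfall, then production, then total_production, each with its own any()); B makes a single stateful pass over the rows, maintaining the set of still-unsatisfied required column indices, removing a column when a non-null cell is seen and breaking early once none remain.
-- outside the precondition, e.g. on _structured_is_valid(['annual_rainfall_mm', 'production'], [(None,)]): A returns False, B raises IndexError
import Mathlib
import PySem

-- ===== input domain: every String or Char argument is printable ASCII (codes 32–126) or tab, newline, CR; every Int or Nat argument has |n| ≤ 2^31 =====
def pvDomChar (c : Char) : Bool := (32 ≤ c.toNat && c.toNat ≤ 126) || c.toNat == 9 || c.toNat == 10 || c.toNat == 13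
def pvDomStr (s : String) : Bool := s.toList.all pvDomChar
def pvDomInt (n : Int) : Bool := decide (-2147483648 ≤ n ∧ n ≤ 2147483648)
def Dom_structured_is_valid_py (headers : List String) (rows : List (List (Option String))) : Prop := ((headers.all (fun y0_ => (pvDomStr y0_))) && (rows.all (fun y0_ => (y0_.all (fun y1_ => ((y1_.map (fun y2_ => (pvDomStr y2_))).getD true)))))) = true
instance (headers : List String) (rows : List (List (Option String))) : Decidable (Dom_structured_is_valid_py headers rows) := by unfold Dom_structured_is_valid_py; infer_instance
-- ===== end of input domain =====

-- B replaces A's per-column scans over the rows by a single stateful pass over the rows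
-- that removes each still-needed required column once a non-null value is seen (objective: alternative).

-- shared cell semantics: r[idx] (in range under Pre_; out of range totalized to a null cell) and the
-- exact non-null predicate '(r[idx] is not None) and (str(r[idx]).strip().lower() not in {"","null","none"})'
def pvCell (r : List (Option String)) (idx : Nat) : Option String :=
  (PySem.List.pyGet? r (idx : Int)).getD none

def pvNullish (c : Option String) : Bool :=
  match c with
  | none => true
  | some s => ["", "null", "none"].contains (PySem.Str.lower (PySem.Str.strip s))

-- ===== PORT A =====
-- any((r[idx] is not None) and (str(r[idx]).strip().lower() not in {...}) for r in rows)
def pvHasVal (rows : List (List (Option String))) (idx : Nat) : Bool :=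
  rows.any (fun r => !pvNullish (pvCell r idx))

-- for key in ("production", "total_production"): …
def pvKeyLoop (headers : List String) (rows : List (List (Option String))) : List String → Bool
  | [] => true
  | k :: ks =>
    if headers.contains k then
      if pvHasVal rows ((PySem.List.index? headers k).getD 0) then pvKeyLoop headers rows ks
      else false
    else pvKeyLoop headers rows ks

def structured_is_valid_py (headers : List String) (rows : List (List (Option String))) : Bool :=
  if headers.isEmpty || rows.isEmpty then false
  else if headers.contains "annual_rainfall_mm" then
    if pvHasVal rows ((PySem.List.index? headers "annual_rainfall_mm").getD 0) then
      pvKeyLoop headers rows ["production", "total_production"]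
    else false
  else pvKeyLoop headers rows ["production", "total_production"]

-- ===== PORT B =====
-- for r in rows: if not needed: break; needed = [i for i in needed if <cell nullish>]
def pvBLoop : List (List (Option String)) → List Nat → List Nat
  | [], needed => needed
  | r :: rs, needed =>
    if needed.isEmpty then needed
    else pvBLoop rs (needed.filter (fun i => pvNullish (pvCell r i)))

def structured_is_valid_py_alt (headers : List String) (rows : List (List (Option String))) : Bool :=
  if headers.isEmpty || rows.isEmpty then false
  else
    let needed :=
      ((["annual_rainfall_mm", "production", "total_production"].filter
          (fun k => headers.contains k)).map
        (fun k => (PySem.List.index? headers k).getD 0))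
    (pvBLoop rows needed).isEmpty

-- ===== PRECONDITION & SPEC =====
-- Pre_ excludes inputs where some row is too short to hold a required column that occurs in the
-- headers: there Python indexing r[idx] can raise IndexError (and A's early exits make whether it
-- raises depend on accidental scan order, so A sometimes still returns where B would raise).
def Pre_structured_is_valid_py (headers : List String) (rows : List (List (Option String))) : Prop :=
  ∀ k ∈ (["annual_rainfall_mm", "production", "total_production"] : List String),
    k ∈ headers → ∀ r ∈ rows, (PySem.List.index? headers k).getD 0 < r.length
instance (headers : List String) (rows : List (List (Option String))) : Decidable (Pre_structured_is_valid_py headers rows) := by unfold Pre_structured_is_valid_py; infer_instance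

def pvWitness_structured_is_valid_py : List String × List (List (Option String)) :=
  (["production", "year"], [[some " 7 ", some "2001"], [none, none]])

def Spec_structured_is_valid_py (headers : List String) (rows : List (List (Option String))) (out : Bool) : Prop := out = structured_is_valid_py_alt headers rows
instance (headers : List String) (rows : List (List (Option String))) (out : Bool) : Decidable (Spec_structured_is_valid_py headers rows out) := by unfold Spec_structured_is_valid_py; infer_instance

-- ===== CLAIM (what is proved, stated in full; the proofs are below) =====
def Claim_equal_structured_is_valid_py : Prop := ∀ (headers : List String) (rows : List (List (Option String))), Dom_structured_is_valid_py headers rows → Pre_structured_is_valid_py headers rows → Spec_structured_is_valid_py headers rows (structured_is_valid_py headers rows)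

-- ===== LEMMAS AND PROOFS =====

lemma pvBLoop_eq (rs : List (List (Option String))) (needed : List Nat) :
    pvBLoop rs needed = needed.filter (fun i => rs.all (fun r => pvNullish (pvCell r i))) := by
  induction rs generalizing needed with
  | nil => simp [pvBLoop]
  | cons r rs ih =>
    by_cases h : needed.isEmpty
    · simp_all [pvBLoop, List.isEmpty_iff]
    · simp [pvBLoop, h, ih, List.filter_filter, Bool.and_comm]

lemma pvKeyLoop_eq (headers : List String) (rows : List (List (Option String))) (ks : List String) :
    pvKeyLoop headers rows ks =
      ks.all (fun k => !headers.contains k || pvHasVal rows ((PySem.List.index? headers k).getD 0)) := by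
  induction ks with
  | nil => simp [pvKeyLoop]
  | cons k ks ih =>
    cases h : headers.contains k
    · have h' : k ∉ headers := by simpa using h
      simp [pvKeyLoop, h', ih]
    · cases hv : pvHasVal rows ((PySem.List.index? headers k).getD 0) <;>
        simp_all [pvKeyLoop]

lemma notAll_eq_hasVal (rows : List (List (Option String))) (idx : Nat) :
    (!rows.all (fun r => pvNullish (pvCell r idx))) = pvHasVal rows idx := by
  simp [pvHasVal, List.all_eq_not_any_not]

lemma filter_isEmpty_eq_all {α : Type} (p : α → Bool) (l : List α) :
    (l.filter p).isEmpty = l.all (fun x => !p x) := by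
  induction l with
  | nil => rfl
  | cons x xs ih => by_cases h : p x <;> simp [h, ih]

-- ===== VERDICT (by name: the statement is the Claim_ definition above) =====
theorem structured_is_valid_py_spec : Claim_equal_structured_is_valid_py := by
  intro headers rows _ _
  unfold Spec_structured_is_valid_py structured_is_valid_py structured_is_valid_py_alt
  by_cases hg : headers.isEmpty || rows.isEmpty
  · simp [hg]
  · simp only [hg, pvBLoop_eq, filter_isEmpty_eq_all, List.all_map, List.all_filter,
      pvKeyLoop_eq, notAll_eq_hasVal]
    by_cases hm : "annual_rainfall_mm" ∈ headers <;>
      by_cases hv : pvHasVal rows ((List.idxOf? "annual_rainfall_mm" headers).getD 0) <;>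
        simp [hm, hv]
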